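-- pv_equiv track=rewrite | github.com/Hsins/CodeWars | Python/6 kyu/VaccineNation/solution.py | vaccine_list
-- ===== SOURCE A (Python) =====
-- def vaccine_list(age, status, month):
--     vaccins = {
--         "fiveInOne":            ['8 weeks', '12 weeks', '16 weeks'],
--         "pneumococcal":         ['8 weeks', '16 weeks'],
--         "rotavirus":            ['8 weeks', '12 weeks'],
--         "meningitisB":          ['8 weeks', '16 weeks', '12 months'],
--         "hibMenC":              ['12 months'],
--         "measlesMumpsRubella":  ['12 months', '40 months'],
--         "preSchoolBooster":     ['40 months'],
--         "offer fluVaccine":     ['september', 'october', 'november']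
--     }
--
--     result = set()
--     for vaccine in vaccins:
--         if age in vaccins[vaccine] or month in vaccins[vaccine] or status in vaccins[vaccine]:
--             result.add(vaccine)
--
--     return sorted(result)
-- ===== SOURCE B (Python) =====
-- def vaccine_list(age, status, month):
--     vaccins = {
--         "fiveInOne":            ['8 weeks', '12 weeks', '16 weeks'],
--         "pneumococcal":         ['8 weeks', '16 weeks'],
--         "rotavirus":            ['8 weeks', '12 weeks'],
--         "meningitisB":          ['8 weeks', '16 weeks', '12 months'],
--         "hibMenC":              ['12 months'],
--         "measlesMumpsRubella":  ['12 months', '40 months'],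
--         "preSchoolBooster":     ['40 months'],
--         "offer fluVaccine":     ['september', 'october', 'november']
--     }
--     index = {}
--     for name, times in vaccins.items():
--         for t in times:
--             index.setdefault(t, set()).add(name)
--     empty = set()
--     return sorted(index.get(age, empty) | index.get(month, empty) | index.get(status, empty))
-- ===== Notes on version B (the rewrite author's own statement) =====
-- stated objective: idiomatic
-- what changed: B builds an inverted index (time string -> set of vaccine names) from the same table once and returns the sorted union of the three dictionary lookups for age, month and status, instead of A's scan over all eight vaccines with three list-membership tests each.
import Mathlib
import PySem

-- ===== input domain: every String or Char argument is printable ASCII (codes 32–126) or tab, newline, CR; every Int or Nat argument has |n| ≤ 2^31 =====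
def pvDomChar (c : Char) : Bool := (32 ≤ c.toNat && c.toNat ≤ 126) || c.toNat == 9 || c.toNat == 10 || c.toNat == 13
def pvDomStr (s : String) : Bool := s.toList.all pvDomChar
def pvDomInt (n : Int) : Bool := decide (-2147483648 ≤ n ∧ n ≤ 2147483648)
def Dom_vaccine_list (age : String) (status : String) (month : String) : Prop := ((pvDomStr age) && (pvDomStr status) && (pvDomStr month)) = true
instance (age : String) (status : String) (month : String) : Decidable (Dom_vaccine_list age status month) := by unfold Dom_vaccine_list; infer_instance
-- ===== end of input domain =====

-- B replaces A's scan over all eight vaccines by an inverted index (time string -> set of vaccine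
-- names) built once from the same table, answering with the union of three dictionary lookups;
-- objective: idiomatic.

-- ===== PORT A =====
-- the vaccines table (the same literal appears in both Python sources)
def pvVaccins : PySem.Dict String (List String) := PySem.Dict.ofList [
  ("fiveInOne",           ["8 weeks", "12 weeks", "16 weeks"]),
  ("pneumococcal",        ["8 weeks", "16 weeks"]),
  ("rotavirus",           ["8 weeks", "12 weeks"]),
  ("meningitisB",         ["8 weeks", "16 weeks", "12 months"]),
  ("hibMenC",             ["12 months"]),
  ("measlesMumpsRubella", ["12 months", "40 months"]),
  ("preSchoolBooster",    ["40 months"]),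
  ("offer fluVaccine",    ["september", "october", "november"])]

def vaccine_list (age : String) (status : String) (month : String) : List String :=
  let vaccins := pvVaccins
  -- for vaccine in vaccins: if age in vaccins[vaccine] or month in ... or status in ...: result.add(vaccine)
  let result : PySem.Set String :=
    (PySem.Dict.keys vaccins).foldl (fun result vaccine =>
      let ts := PySem.Dict.getD vaccins vaccine []
      if ts.contains age || ts.contains month || ts.contains status
      then PySem.Set.add result vaccine else result) PySem.Set.empty
  PySem.List.sorted result (fun x => x) false

-- ===== PORT B =====
def vaccine_list_alt (age : String) (status : String) (month : String) : List String :=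
  let vaccins := pvVaccins
  -- for name, times in vaccins.items(): for t in times: index.setdefault(t, set()).add(name)
  let index : PySem.Dict String (PySem.Set String) :=
    vaccins.items.foldl (fun index nt =>
      nt.2.foldl (fun index t =>
        PySem.Dict.modify index t PySem.Set.empty (fun s => PySem.Set.add s nt.1)) index)
      PySem.Dict.empty
  let empty : PySem.Set String := PySem.Set.empty
  PySem.List.sorted
    (PySem.Set.union (PySem.Set.union (PySem.Dict.getD index age empty)
      (PySem.Dict.getD index month empty)) (PySem.Dict.getD index status empty))
    (fun x => x) false

-- ===== PRECONDITION & SPEC =====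
def Spec_vaccine_list (age : String) (status : String) (month : String) (out : List String) : Prop := out = vaccine_list_alt age status month
instance (age : String) (status : String) (month : String) (out : List String) : Decidable (Spec_vaccine_list age status month out) := by unfold Spec_vaccine_list; infer_instance

-- ===== CLAIM (what is proved, stated in full; the proofs are below) =====
def Claim_equal_vaccine_list : Prop := ∀ (age : String) (status : String) (month : String), Dom_vaccine_list age status month → Spec_vaccine_list age status month (vaccine_list age status month)

-- ===== LEMMAS AND PROOFS =====

-- the eight time strings occurring in the table
def pvTimes : List String := ["8 weeks", "12 weeks", "16 weeks", "12 months", "40 months", "september", "october", "november"]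

-- a representative of each equivalence class of inputs (equal to one of the eight times, or to none)
def pvRep : Fin 9 → String := fun i => (pvTimes ++ [""]).getD i ""

def pvCls (x : String) : Fin 9 :=
  if x = "8 weeks" then 0 else if x = "12 weeks" then 1 else if x = "16 weeks" then 2
  else if x = "12 months" then 3 else if x = "40 months" then 4 else if x = "september" then 5
  else if x = "october" then 6 else if x = "november" then 7 else 8

lemma pvAtom (x t : String) (ht : t ∈ pvTimes) : (x == t) = (pvRep (pvCls x) == t) := by
  unfold pvCls
  split_ifs with h1 h2 h3 h4 h5 h6 h7 h8
  · subst h1; rfl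
  · subst h2; rfl
  · subst h3; rfl
  · subst h4; rfl
  · subst h5; rfl
  · subst h6; rfl
  · subst h7; rfl
  · subst h8; rfl
  · fin_cases ht <;> simp_all [pvRep, pvTimes]

lemma pvAtom' (x t : String) (ht : t ∈ pvTimes) : (t == x) = (t == pvRep (pvCls x)) := by
  rw [BEq.comm, pvAtom x t ht, BEq.comm]

-- the two pre-sort collections, as proof-side helpers
def pvASet (age status month : String) : PySem.Set String :=
  (PySem.Dict.keys pvVaccins).foldl (fun result vaccine =>
    let ts := PySem.Dict.getD pvVaccins vaccine []
    if ts.contains age || ts.contains month || ts.contains status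
    then PySem.Set.add result vaccine else result) PySem.Set.empty

def pvIndex : PySem.Dict String (PySem.Set String) :=
  pvVaccins.items.foldl (fun index nt =>
    nt.2.foldl (fun index t =>
      PySem.Dict.modify index t PySem.Set.empty (fun s => PySem.Set.add s nt.1)) index)
    PySem.Dict.empty

def pvBSet (age status month : String) : PySem.Set String :=
  PySem.Set.union (PySem.Set.union (PySem.Dict.getD pvIndex age PySem.Set.empty)
    (PySem.Dict.getD pvIndex month PySem.Set.empty)) (PySem.Dict.getD pvIndex status PySem.Set.empty)

lemma A_eq (a s m : String) : vaccine_list a s m = PySem.List.sorted (pvASet a s m) (fun x => x) false := rfl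
lemma B_eq (a s m : String) : vaccine_list_alt a s m = PySem.List.sorted (pvBSet a s m) (fun x => x) false := rfl

lemma pvKeys_eval : PySem.Dict.keys pvVaccins = ["fiveInOne", "pneumococcal", "rotavirus", "meningitisB", "hibMenC", "measlesMumpsRubella", "preSchoolBooster", "offer fluVaccine"] := rfl

lemma pvG1 : PySem.Dict.getD pvVaccins "fiveInOne" [] = ["8 weeks", "12 weeks", "16 weeks"] := by decide
lemma pvG2 : PySem.Dict.getD pvVaccins "pneumococcal" [] = ["8 weeks", "16 weeks"] := by decide
lemma pvG3 : PySem.Dict.getD pvVaccins "rotavirus" [] = ["8 weeks", "12 weeks"] := by decide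
lemma pvG4 : PySem.Dict.getD pvVaccins "meningitisB" [] = ["8 weeks", "16 weeks", "12 months"] := by decide
lemma pvG5 : PySem.Dict.getD pvVaccins "hibMenC" [] = ["12 months"] := by decide
lemma pvG6 : PySem.Dict.getD pvVaccins "measlesMumpsRubella" [] = ["12 months", "40 months"] := by decide
lemma pvG7 : PySem.Dict.getD pvVaccins "preSchoolBooster" [] = ["40 months"] := by decide
lemma pvG8 : PySem.Dict.getD pvVaccins "offer fluVaccine" [] = ["september", "october", "november"] := by decide

lemma A_cong (a s m a' s' m' : String)
    (ha : ∀ t ∈ pvTimes, (a == t) = (a' == t))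
    (hs : ∀ t ∈ pvTimes, (s == t) = (s' == t))
    (hm : ∀ t ∈ pvTimes, (m == t) = (m' == t)) :
    pvASet a s m = pvASet a' s' m' := by
  have ha1 := ha "8 weeks" (by simp [pvTimes]); have ha2 := ha "12 weeks" (by simp [pvTimes])
  have ha3 := ha "16 weeks" (by simp [pvTimes]); have ha4 := ha "12 months" (by simp [pvTimes])
  have ha5 := ha "40 months" (by simp [pvTimes]); have ha6 := ha "september" (by simp [pvTimes])
  have ha7 := ha "october" (by simp [pvTimes]); have ha8 := ha "november" (by simp [pvTimes])
  have hs1 := hs "8 weeks" (by simp [pvTimes]); have hs2 := hs "12 weeks" (by simp [pvTimes])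
  have hs3 := hs "16 weeks" (by simp [pvTimes]); have hs4 := hs "12 months" (by simp [pvTimes])
  have hs5 := hs "40 months" (by simp [pvTimes]); have hs6 := hs "september" (by simp [pvTimes])
  have hs7 := hs "october" (by simp [pvTimes]); have hs8 := hs "november" (by simp [pvTimes])
  have hm1 := hm "8 weeks" (by simp [pvTimes]); have hm2 := hm "12 weeks" (by simp [pvTimes])
  have hm3 := hm "16 weeks" (by simp [pvTimes]); have hm4 := hm "12 months" (by simp [pvTimes])
  have hm5 := hm "40 months" (by simp [pvTimes]); have hm6 := hm "september" (by simp [pvTimes])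
  have hm7 := hm "october" (by simp [pvTimes]); have hm8 := hm "november" (by simp [pvTimes])
  simp only [pvASet, pvKeys_eval, pvG1, pvG2, pvG3, pvG4, pvG5, pvG6, pvG7, pvG8,
    List.foldl_cons, List.foldl_nil, List.contains_cons, List.elem_nil, ha1, ha2, ha3, ha4, ha5, ha6, ha7, ha8, hs1, hs2, hs3, hs4, hs5, hs6, hs7, hs8,
    hm1, hm2, hm3, hm4, hm5, hm6, hm7, hm8]

lemma pvIndex_eval : pvIndex = PySem.Dict.mk [
    ("8 weeks", ["fiveInOne", "pneumococcal", "rotavirus", "meningitisB"]),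
    ("12 weeks", ["fiveInOne", "rotavirus"]),
    ("16 weeks", ["fiveInOne", "pneumococcal", "meningitisB"]),
    ("12 months", ["meningitisB", "hibMenC", "measlesMumpsRubella"]),
    ("40 months", ["measlesMumpsRubella", "preSchoolBooster"]),
    ("september", ["offer fluVaccine"]),
    ("october", ["offer fluVaccine"]),
    ("november", ["offer fluVaccine"])] := by decide

lemma pvGet_mk_nil (x : String) : (PySem.Dict.mk ([] : List (String × PySem.Set String))).get? x = none := rfl

lemma B_cong (a s m a' s' m' : String)
    (ha : ∀ t ∈ pvTimes, (t == a) = (t == a'))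
    (hs : ∀ t ∈ pvTimes, (t == s) = (t == s'))
    (hm : ∀ t ∈ pvTimes, (t == m) = (t == m')) :
    pvBSet a s m = pvBSet a' s' m' := by
  have ha1 := ha "8 weeks" (by simp [pvTimes]); have ha2 := ha "12 weeks" (by simp [pvTimes])
  have ha3 := ha "16 weeks" (by simp [pvTimes]); have ha4 := ha "12 months" (by simp [pvTimes])
  have ha5 := ha "40 months" (by simp [pvTimes]); have ha6 := ha "september" (by simp [pvTimes])
  have ha7 := ha "october" (by simp [pvTimes]); have ha8 := ha "november" (by simp [pvTimes])
  have hs1 := hs "8 weeks" (by simp [pvTimes]); have hs2 := hs "12 weeks" (by simp [pvTimes])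
  have hs3 := hs "16 weeks" (by simp [pvTimes]); have hs4 := hs "12 months" (by simp [pvTimes])
  have hs5 := hs "40 months" (by simp [pvTimes]); have hs6 := hs "september" (by simp [pvTimes])
  have hs7 := hs "october" (by simp [pvTimes]); have hs8 := hs "november" (by simp [pvTimes])
  have hm1 := hm "8 weeks" (by simp [pvTimes]); have hm2 := hm "12 weeks" (by simp [pvTimes])
  have hm3 := hm "16 weeks" (by simp [pvTimes]); have hm4 := hm "12 months" (by simp [pvTimes])
  have hm5 := hm "40 months" (by simp [pvTimes]); have hm6 := hm "september" (by simp [pvTimes])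
  have hm7 := hm "october" (by simp [pvTimes]); have hm8 := hm "november" (by simp [pvTimes])
  simp only [pvBSet, pvIndex_eval, PySem.Dict.getD_eq_get?_getD, PySem.Dict.get?_mk_cons,
    pvGet_mk_nil, ha1, ha2, ha3, ha4, ha5, ha6, ha7, ha8, hs1, hs2, hs3, hs4, hs5, hs6, hs7, hs8,
    hm1, hm2, hm3, hm4, hm5, hm6, hm7, hm8]

lemma pvMaster : ∀ i j k : Fin 9,
    (pvASet (pvRep i) (pvRep j) (pvRep k)).Perm (pvBSet (pvRep i) (pvRep j) (pvRep k)) := by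
  decide

-- ===== VERDICT (by name: the statement is the Claim_ definition above) =====
theorem vaccine_list_spec : Claim_equal_vaccine_list := by
  intro a s m _
  unfold Spec_vaccine_list
  rw [A_eq, B_eq, PySem.List.sorted_id_eq_sorted_id_iff_perm]
  rw [A_cong a s m (pvRep (pvCls a)) (pvRep (pvCls s)) (pvRep (pvCls m))
    (fun t ht => pvAtom a t ht) (fun t ht => pvAtom s t ht) (fun t ht => pvAtom m t ht)]
  rw [B_cong a s m (pvRep (pvCls a)) (pvRep (pvCls s)) (pvRep (pvCls m))
    (fun t ht => pvAtom' a t ht) (fun t ht => pvAtom' s t ht) (fun t ht => pvAtom' m t ht)]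
  exact pvMaster _ _ _
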